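-- pv_equiv track=rewrite | github.com/poleha/codility | brackets_rotation.py | get_sum2
-- ===== SOURCE A (Python) =====
-- def get_sum2(errors, L):
--     if not errors:
--         return L
--     max_s = 0
--     prev_stop = None
--     stop = None
--     for stop in errors:
--         if prev_stop is None:
--             s = stop
--         else:
--             s = stop - prev_stop - 1
--         max_s = max(s, max_s)
--         prev_stop = stop
--     if stop is not None and stop < L - 1:
--         max_s = max(max_s, L - stop - 1)
--     return max_s
-- ===== SOURCE B (Python) =====
-- def get_sum2(errors, L):
--     if not errors:
--         return L
--     positions = [-1] + errors + [L]
--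
--     def best(i, j):
--         # max of positions[k+1] - positions[k] - 1 over i <= k < j, by divide and conquer
--         if j - i <= 1:
--             return positions[j] - positions[i] - 1
--         m = (i + j) // 2
--         return max(best(i, m), best(m, j))
--
--     return max(0, best(0, len(positions) - 1))
-- ===== Notes on version B (the rewrite author's own statement) =====
-- stated objective: alternative
-- what changed: Replaces A's stateful linear scan (prev_stop tracking, first-element special case, post-loop boundary fixup) by a divide-and-conquer recursion over the sentinel-augmented positions array [-1]+errors+[L] that merges half-range gap maxima, floored at 0.
import Mathlib
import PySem

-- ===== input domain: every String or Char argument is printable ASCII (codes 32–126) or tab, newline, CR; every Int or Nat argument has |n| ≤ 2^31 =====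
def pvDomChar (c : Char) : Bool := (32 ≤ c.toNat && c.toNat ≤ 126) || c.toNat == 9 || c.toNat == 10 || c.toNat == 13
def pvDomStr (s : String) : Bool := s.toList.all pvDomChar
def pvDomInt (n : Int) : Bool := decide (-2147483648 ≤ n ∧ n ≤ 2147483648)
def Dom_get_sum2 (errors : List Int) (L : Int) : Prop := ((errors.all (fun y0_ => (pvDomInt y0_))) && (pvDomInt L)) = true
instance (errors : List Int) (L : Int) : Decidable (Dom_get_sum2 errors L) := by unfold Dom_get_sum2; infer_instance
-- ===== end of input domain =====

-- B replaces A's stateful linear scan (prev_stop tracking, first-element special case,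
-- post-loop boundary fixup) by a divide-and-conquer recursion over the sentinel-augmented
-- positions array [-1] ++ errors ++ [L]; objective: alternative (same O(n) cost).

-- ===== PORT A =====
-- the loop body of A: state = (max_s, prev_stop)
def pvStepA (acc : Int × Option Int) (stop : Int) : Int × Option Int :=
  let s := match acc.2 with
    | none => stop
    | some prev => stop - prev - 1
  (max s acc.1, some stop)

def get_sum2 (errors : List Int) (L : Int) : Int :=
  if errors = [] then L
  else
    let st := errors.foldl pvStepA (0, none)
    -- after the loop, `stop` is the last element (st.2); `stop is not None` holds iff st.2 ≠ none
    match st.2 with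
    | some stop => if stop < L - 1 then max st.1 (L - stop - 1) else st.1
    | none => st.1

-- ===== PORT B =====
-- best(i, j): max of positions[k+1] - positions[k] - 1 over i <= k < j, by divide and conquer.
-- Indices are Nat: in B they are always in [0, len-1] and nonnegative, so Nat indexing and
-- Nat (i+j)/2 coincide with Python's positions[…] and (i+j)//2 on every reached call.
def pvBest (P : List Int) (i j : Nat) : Int :=
  if j - i ≤ 1 then (P.getD j 0) - (P.getD i 0) - 1
  else
    let m := (i + j) / 2
    max (pvBest P i m) (pvBest P m j)
termination_by j - i
decreasing_by all_goals omega

def get_sum2_alt (errors : List Int) (L : Int) : Int :=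
  if errors = [] then L
  else
    let positions : List Int := -1 :: (errors ++ [L])
    max 0 (pvBest positions 0 (positions.length - 1))

-- ===== PRECONDITION & SPEC =====
def Spec_get_sum2 (errors : List Int) (L : Int) (out : Int) : Prop := out = get_sum2_alt errors L
instance (errors : List Int) (L : Int) (out : Int) : Decidable (Spec_get_sum2 errors L out) := by unfold Spec_get_sum2; infer_instance

-- ===== CLAIM (what is proved, stated in full; the proofs are below) =====
def Claim_equal_get_sum2 : Prop := ∀ (errors : List Int) (L : Int), Dom_get_sum2 errors L → Spec_get_sum2 errors L (get_sum2 errors L)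

-- ===== LEMMAS AND PROOFS =====

-- (max_s, last) after running A's loop body from state (m, some p) over xs
def pvCore : Int → Int → List Int → Int × Int
  | m, p, [] => (m, p)
  | m, p, x :: xs => pvCore (max (x - p - 1) m) x xs

-- linear left-to-right reference version of pvBest
def pvSeg (P : List Int) (i j : Nat) : Int :=
  if j - i ≤ 1 then (P.getD j 0) - (P.getD i 0) - 1
  else max ((P.getD (i + 1) 0) - (P.getD i 0) - 1) (pvSeg P (i + 1) j)
termination_by j - i
decreasing_by omega

-- maximum of the gap list from sentinel p to sentinel L over xs
def pvGmax : Int → Int → List Int → Int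
  | p, L, [] => L - p - 1
  | p, L, x :: xs => max (x - p - 1) (pvGmax x L xs)

theorem pv_foldA (xs : List Int) : ∀ (m p : Int),
    xs.foldl pvStepA (m, some p) = ((pvCore m p xs).1, some (pvCore m p xs).2) := by
  induction xs with
  | nil => intro m p; simp [pvCore]
  | cons x xs ih => intro m p; simp [pvStepA, pvCore, ih]

-- equation lemmas for pvSeg and pvBest (their WF-recursion bodies, zeta-reduced)
theorem pvSeg_base (P : List Int) (i j : Nat) (h : j - i ≤ 1) :
    pvSeg P i j = (P.getD j 0) - (P.getD i 0) - 1 := by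
  rw [pvSeg, if_pos h]

theorem pvSeg_step (P : List Int) (i j : Nat) (h : ¬ j - i ≤ 1) :
    pvSeg P i j = max ((P.getD (i + 1) 0) - (P.getD i 0) - 1) (pvSeg P (i + 1) j) := by
  rw [pvSeg, if_neg h]

theorem pvBest_base (P : List Int) (i j : Nat) (h : j - i ≤ 1) :
    pvBest P i j = (P.getD j 0) - (P.getD i 0) - 1 := by
  rw [pvBest, if_pos h]

theorem pvBest_step (P : List Int) (i j : Nat) (h : ¬ j - i ≤ 1) :
    pvBest P i j = max (pvBest P i ((i + j) / 2)) (pvBest P ((i + j) / 2) j) := by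
  rw [pvBest, if_neg h]

-- splitting lemma: pvSeg merges at any interior point
theorem pvSeg_split (P : List Int) : ∀ (k i j : Nat), k = j - i → ∀ m, i < m → m < j →
    pvSeg P i j = max (pvSeg P i m) (pvSeg P m j) := by
  intro k
  induction k using Nat.strong_induction_on with
  | _ k ih =>
    intro i j hk m him hmj
    rw [pvSeg_step P i j (by omega)]
    by_cases hm : m = i + 1
    · subst hm
      rw [pvSeg_base P i (i+1) (by omega)]
    · rw [ih (j - (i+1)) (by omega) (i+1) j rfl m (by omega) hmj]
      rw [pvSeg_step P i m (by omega)]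
      omega

-- pvBest computes the same as the linear reference pvSeg
theorem pvBest_eq_seg (P : List Int) : ∀ (k i j : Nat), k = j - i →
    pvBest P i j = pvSeg P i j := by
  intro k
  induction k using Nat.strong_induction_on with
  | _ k ih =>
    intro i j hk
    by_cases h : j - i ≤ 1
    · rw [pvBest_base P i j h, pvSeg_base P i j h]
    · have h1 : i < (i + j) / 2 := by omega
      have h2 : (i + j) / 2 < j := by omega
      rw [pvBest_step P i j h,
          ih ((i+j)/2 - i) (by omega) i ((i+j)/2) rfl,
          ih (j - (i+j)/2) (by omega) ((i+j)/2) j rfl,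
          ← pvSeg_split P (j - i) i j rfl ((i+j)/2) h1 h2]

-- shift lemma: dropping the head shifts pvSeg indices
theorem pvSeg_shift (a : Int) (Q : List Int) : ∀ (k i j : Nat), k = j - i →
    pvSeg (a :: Q) (i + 1) (j + 1) = pvSeg Q i j := by
  intro k
  induction k using Nat.strong_induction_on with
  | _ k ih =>
    intro i j hk
    by_cases h : j - i ≤ 1
    · rw [pvSeg_base (a :: Q) (i+1) (j+1) (by omega), pvSeg_base Q i j h]
      simp
    · rw [pvSeg_step (a :: Q) (i+1) (j+1) (by omega), pvSeg_step Q i j h,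
          ih (j - (i+1)) (by omega) (i+1) j rfl]
      simp

-- pvSeg over the whole sentinel-augmented list is pvGmax
theorem pvSeg_gmax (xs : List Int) : ∀ (p L : Int),
    pvSeg (p :: (xs ++ [L])) 0 (xs.length + 1) = pvGmax p L xs := by
  induction xs with
  | nil => intro p L; rw [pvSeg_base _ _ _ (by simp)]; simp [pvGmax]
  | cons x ys ih =>
    intro p L
    rw [pvSeg_step _ _ _ (by simp)]
    have hsh := pvSeg_shift p ((x :: ys) ++ [L]) (ys.length + 1) 0 (ys.length + 1) rfl
    simp only [List.cons_append, List.length_cons, Nat.zero_add] at hsh ⊢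
    rw [hsh, ih x L]
    simp [pvGmax]

-- A's post-loop value in terms of pvGmax
theorem pv_key (xs : List Int) : ∀ (m p L : Int), 0 ≤ m →
    (if (pvCore m p xs).2 < L - 1 then max (pvCore m p xs).1 (L - (pvCore m p xs).2 - 1)
     else (pvCore m p xs).1)
      = max m (max 0 (pvGmax p L xs)) := by
  induction xs with
  | nil => intro m p L hm; simp only [pvCore, pvGmax]; split <;> omega
  | cons x xs ih =>
      intro m p L hm
      simp only [pvCore, pvGmax]
      rw [ih (max (x - p - 1) m) x L (by omega)]
      omega

-- ===== VERDICT (by name: the statement is the Claim_ definition above) =====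
theorem get_sum2_spec : Claim_equal_get_sum2 := by
  intro errors L _
  unfold Spec_get_sum2
  cases errors with
  | nil => rfl
  | cons e rest =>
      show get_sum2 (e :: rest) L = get_sum2_alt (e :: rest) L
      unfold get_sum2 get_sum2_alt
      simp only [if_neg (List.cons_ne_nil e rest)]
      rw [List.foldl_cons]
      have h1 : pvStepA (0, none) e = (max e 0, some e) := by simp [pvStepA]
      rw [h1, pv_foldA]
      simp only []
      rw [pv_key rest (max e 0) e L (by omega)]
      have hlen : ((-1 : Int) :: ((e :: rest) ++ [L])).length - 1 = (e :: rest).length + 1 := by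
        simp
      rw [hlen, pvBest_eq_seg _ ((e :: rest).length + 1) 0 ((e :: rest).length + 1) rfl,
          pvSeg_gmax (e :: rest) (-1) L]
      simp only [pvGmax]
      omega
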